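-- pv_equiv track=rewrite | github.com/BotAldaris/AOC2024 | 6/6.py | extract_walls_and_player_from_text
-- ===== SOURCE A (Python) =====
-- from collections import namedtuple
--
-- Vec2 = namedtuple("Vec2", ["x", "y"])
--
-- def extract_walls_and_player_from_text(
--     lines: list[str],
-- ) -> tuple[dict[int, list[int]], dict[int, list[int]], Vec2]:
--     player = Vec2(0, 0)
--     x: dict[int, list[int]] = dict()
--     y: dict[int, list[int]] = dict()
--     for i in range(len(lines)):
--         for j in range(len(lines[i])):
--             match lines[i][j]:
--                 case "#":
--                     x_list = x.get(i, [])
--                     x_list.append(j)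
--                     x[i] = x_list
--                     y_list = y.get(j, [])
--                     y_list.append(i)
--                     y[j] = y_list
--                 case "^":
--                     player = Vec2(i, j)
--     return (x, y, player)
-- ===== SOURCE B (Python) =====
-- from collections import namedtuple
--
-- Vec2 = namedtuple("Vec2", ["x", "y"])
--
-- def extract_walls_and_player_from_text(lines):
--     # Row dict from per-row index comprehensions; column dict derived from the
--     # row dict (the grid is never rescanned); player found by a reverse search
--     # with str.rfind and an early break instead of a keep-last forward scan.
--     x = {}
--     for i, line in enumerate(lines):
--         js = [j for j, c in enumerate(line) if c == "#"]
--         if js: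
--             x[i] = js
--     y = {}
--     for i, js in x.items():
--         for j in js:
--             y.setdefault(j, []).append(i)
--     player = Vec2(0, 0)
--     for i, line in reversed(list(enumerate(lines))):
--         j = line.rfind("^")
--         if j != -1:
--             player = Vec2(i, j)
--             break
--     return (x, y, player)
-- ===== Notes on version B (the rewrite author's own statement) =====
-- stated objective: alternative
-- what changed: A builds both dicts and the player inline in one char-by-char nested scan; B builds the row dict from per-row index comprehensions, derives the column dict from the row dict's items without rescanning the grid, and finds the player by a reverse search over the rows with str.rfind and an early break.
import Mathlib
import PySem

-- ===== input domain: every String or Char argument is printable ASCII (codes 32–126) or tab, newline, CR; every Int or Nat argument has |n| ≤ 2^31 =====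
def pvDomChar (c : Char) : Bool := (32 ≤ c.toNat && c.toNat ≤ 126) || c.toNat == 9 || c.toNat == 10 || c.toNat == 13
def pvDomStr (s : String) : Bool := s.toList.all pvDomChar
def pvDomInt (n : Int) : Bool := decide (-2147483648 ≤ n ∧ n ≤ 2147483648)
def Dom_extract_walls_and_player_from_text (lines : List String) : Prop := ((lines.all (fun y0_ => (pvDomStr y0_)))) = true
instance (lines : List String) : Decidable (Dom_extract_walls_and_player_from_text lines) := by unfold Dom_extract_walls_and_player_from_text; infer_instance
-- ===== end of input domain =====

-- B replaces A's single char-by-char pass with: a row dict built from per-row index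
-- comprehensions, a column dict derived from the row dict, and the player found by a
-- reverse search with rfind and early break (objective: alternative).

-- ===== PORT A =====
-- Nested index loops over range(len(lines)) / range(len(lines[i])); state (player, x, y).
-- lines[i] / lines[i][j] are always in range here, so pyGetD's defaults are never used (exact).
def extract_walls_and_player_from_text (lines : List String) :
    (List (Int × List Int)) × (List (Int × List Int)) × (Int × Int) :=
  let st : (Int × Int) × PySem.Dict Int (List Int) × PySem.Dict Int (List Int) :=
    ((0, 0), PySem.Dict.empty, PySem.Dict.empty)
  let st := (PySem.List.pyRange 0 (PySem.List.len lines) 1).foldl (fun st i =>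
    let line := PySem.List.pyGetD lines i ""      -- lines[i]
    (PySem.List.pyRange 0 (PySem.Str.len line) 1).foldl (fun st j =>
      match PySem.List.pyGetD line.toList j ' ' with   -- lines[i][j]
      | '#' =>
        let x_list := st.2.1.getD i [] ++ [j]         -- x.get(i, []); append(j)
        let y_list := st.2.2.getD j [] ++ [i]         -- y.get(j, []); append(i)
        (st.1, (st.2.1.insert i x_list, st.2.2.insert j y_list))
      | '^' => ((i, j), st.2)
      | _ => st) st) st
  (st.2.1.items, st.2.2.items, st.1)

-- ===== PORT B =====
-- [j for j, c in enumerate(line) if c == "#"]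
def pvRowWalls (line : String) : List Int :=
  ((PySem.List.enumerate line.toList 0).filter (fun q => q.2 == '#')).map (·.1)

-- 'for i, line in reversed(list(enumerate(lines))): j = line.rfind("^"); if j != -1: player = (i, j); break'
def pvFindPlayer : List (Int × String) → Int × Int
  | [] => (0, 0)
  | p :: rest =>
    let j := PySem.Str.rfind p.2 "^"
    if j ≠ -1 then (p.1, j) else pvFindPlayer rest

def extract_walls_and_player_from_text_alt (lines : List String) :
    (List (Int × List Int)) × (List (Int × List Int)) × (Int × Int) :=
  -- x: per-row comprehension, row kept only if it has walls
  let x := (PySem.List.enumerate lines 0).foldl (fun d p =>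
      let js := pvRowWalls p.2
      if js = [] then d else d.insert p.1 js) PySem.Dict.empty
  -- y: derived from x.items(); setdefault(j, []).append(i) = insert j (getD j [] ++ [i]) (exact)
  let y := x.items.foldl (fun d p =>
      p.2.foldl (fun d j => d.insert j (d.getD j [] ++ [p.1])) d) PySem.Dict.empty
  (x.items, y.items, pvFindPlayer (PySem.List.enumerate lines 0).reverse)

-- ===== PRECONDITION & SPEC =====
def Spec_extract_walls_and_player_from_text (lines : List String) (out : (List (Int × List Int)) × (List (Int × List Int)) × (Int × Int)) : Prop := out = extract_walls_and_player_from_text_alt lines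
instance (lines : List String) (out : (List (Int × List Int)) × (List (Int × List Int)) × (Int × Int)) : Decidable (Spec_extract_walls_and_player_from_text lines out) := by unfold Spec_extract_walls_and_player_from_text; infer_instance

-- ===== CLAIM (what is proved, stated in full; the proofs are below) =====
def Claim_equal_extract_walls_and_player_from_text : Prop := ∀ (lines : List String), Dom_extract_walls_and_player_from_text lines → Spec_extract_walls_and_player_from_text lines (extract_walls_and_player_from_text lines)

-- ===== LEMMAS AND PROOFS =====

-- the flattened character sequence A's nested loops traverse
def pvCells (lines : List String) : List (Int × Int × Char) :=
  (PySem.List.enumerate lines 0).flatMap (fun p =>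
    (PySem.List.enumerate p.2.toList 0).map (fun q => (p.1, q.1, q.2)))

def pvStepA (st : (Int × Int) × PySem.Dict Int (List Int) × PySem.Dict Int (List Int))
    (t : Int × Int × Char) :
    (Int × Int) × PySem.Dict Int (List Int) × PySem.Dict Int (List Int) :=
  match t.2.2 with
  | '#' => (st.1, (st.2.1.insert t.1 (st.2.1.getD t.1 [] ++ [t.2.1]),
                   st.2.2.insert t.2.1 (st.2.2.getD t.2.1 [] ++ [t.1])))
  | '^' => ((t.1, t.2.1), st.2)
  | _ => st

def pvWalls (cs : List (Int × Int × Char)) : List (Int × Int) :=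
  cs.filterMap (fun t => if t.2.2 = '#' then some (t.1, t.2.1) else none)

def pvPlayer (cs : List (Int × Int × Char)) (p0 : Int × Int) : Int × Int :=
  cs.foldl (fun p t => if t.2.2 = '^' then (t.1, t.2.1) else p) p0

def pvSX (d : PySem.Dict Int (List Int)) (w : Int × Int) : PySem.Dict Int (List Int) :=
  d.insert w.1 (d.getD w.1 [] ++ [w.2])

def pvSY (d : PySem.Dict Int (List Int)) (w : Int × Int) : PySem.Dict Int (List Int) :=
  d.insert w.2 (d.getD w.2 [] ++ [w.1])

-- B's x-building step over rows
def pvStepX (d : PySem.Dict Int (List Int)) (p : Int × String) : PySem.Dict Int (List Int) :=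
  if pvRowWalls p.2 = [] then d else d.insert p.1 (pvRowWalls p.2)

def pvRowItem (p : Int × String) : Option (Int × List Int) :=
  if pvRowWalls p.2 = [] then none else some (p.1, pvRowWalls p.2)

theorem pvA_foldl (cs : List (Int × Int × Char)) :
    ∀ p0 x0 y0, cs.foldl pvStepA (p0, x0, y0) =
      (pvPlayer cs p0, (pvWalls cs).foldl pvSX x0, (pvWalls cs).foldl pvSY y0) := by
  induction cs with
  | nil => simp [pvWalls, pvPlayer]
  | cons t rest ih =>
    intro p0 x0 y0
    by_cases h1 : t.2.2 = '#'
    · simpa [pvStepA, pvWalls, pvPlayer, pvSX, pvSY, h1] using ih _ _ _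
    · by_cases h2 : t.2.2 = '^' <;>
        simpa [pvStepA, pvWalls, pvPlayer, h1, h2] using ih _ _ _

theorem pvFoldlEnum {a b : Type} (xs : List a) (d : a) (f : b -> Int × a -> b) (init : b) :
    (PySem.List.enumerate xs 0).foldl f init
      = (PySem.List.pyRange 0 (PySem.List.len xs) 1).foldl
          (fun acc j => f acc (j, PySem.List.pyGetD xs j d)) init := by
  rw [PySem.List.enumerate_eq_map_pyRange (d := d), List.foldl_map]

theorem pvA_eq_cells (lines : List String) :
    extract_walls_and_player_from_text lines =
      (let st := (pvCells lines).foldl pvStepA ((0, 0), PySem.Dict.empty, PySem.Dict.empty)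
       (st.2.1.items, st.2.2.items, st.1)) := by
  simp only [pvCells, List.foldl_flatMap, List.foldl_map]
  rw [pvFoldlEnum lines ""]
  simp only [pvFoldlEnum (d := ' ')]
  rfl

-- ===== walls as a per-row flat list =====

theorem pvRowWalls_filterMap (i : Int) (cs : List (Int × Char)) :
    cs.filterMap (fun q => if q.2 = '#' then some (i, q.1) else none)
      = (cs.filter (fun q => q.2 == '#')).map (fun q => (i, q.1)) := by
  induction cs with
  | nil => simp
  | cons q t ih =>
    by_cases h : q.2 = '#' <;>
      simp [h, ih]

theorem pvWalls_cells (lines : List String) :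
    pvWalls (pvCells lines)
      = (PySem.List.enumerate lines 0).flatMap
          (fun p => (pvRowWalls p.2).map (fun j => (p.1, j))) := by
  simp only [pvCells, pvWalls]
  induction PySem.List.enumerate lines 0 with
  | nil => simp
  | cons p rest ih =>
    simp only [List.flatMap_cons, List.filterMap_append, ih, List.filterMap_map]
    congr 1
    have := pvRowWalls_filterMap p.1 (PySem.List.enumerate p.2.toList 0)
    simpa [Function.comp, pvRowWalls, List.map_map] using this

-- ===== x : fold of pvSX over walls = B's row-wise build =====

theorem pvSX_run (i : Int) (js : List Int) :
    ∀ (d : PySem.Dict Int (List Int)) (v : List Int),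
      ((js.map (fun j => (i, j))).foldl pvSX (d.insert i v)) = d.insert i (v ++ js) := by
  induction js with
  | nil => simp
  | cons j t ih =>
    intro d v
    have : pvSX (d.insert i v) (i, j) = d.insert i (v ++ [j]) := by
      simp [pvSX, PySem.Dict.getD_insert_self, PySem.Dict.insert_insert_self]
    simp only [List.map_cons, List.foldl_cons, this, ih]
    simp

theorem pvSX_fresh (i : Int) (js : List Int) (d : PySem.Dict Int (List Int))
    (h : d.contains i = false) :
    ((js.map (fun j => (i, j))).foldl pvSX d) = if js = [] then d else d.insert i js := by
  cases js with
  | nil => simp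
  | cons j t =>
    have h0 : pvSX d (i, j) = d.insert i [j] := by
      simp [pvSX, PySem.Dict.getD_of_not_contains _ _ h]
    simp only [List.map_cons, List.foldl_cons, h0, pvSX_run, if_neg (List.cons_ne_nil j t)]
    simp

theorem pvX_both (rows : List (Int × String)) :
    ∀ (d : PySem.Dict Int (List Int)),
      (∀ p ∈ rows, d.contains p.1 = false) → (rows.map (·.1)).Nodup →
      ((rows.flatMap (fun p => (pvRowWalls p.2).map (fun j => (p.1, j)))).foldl pvSX d)
        = rows.foldl pvStepX d := by
  induction rows with
  | nil => simp
  | cons p rest ih =>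
    intro d hfresh hnd
    have hp : d.contains p.1 = false := hfresh p (List.mem_cons_self ..)
    simp only [List.flatMap_cons, List.foldl_append, List.foldl_cons]
    rw [pvSX_fresh p.1 (pvRowWalls p.2) d hp]
    simp only [List.map_cons, List.nodup_cons] at hnd
    by_cases hnil : pvRowWalls p.2 = []
    · rw [if_pos hnil, ih d (fun q hq => hfresh q (List.mem_cons_of_mem _ hq)) hnd.2]
      simp [pvStepX, hnil]
    · rw [if_neg hnil]
      rw [ih (d.insert p.1 (pvRowWalls p.2)) ?_ hnd.2]
      · simp [pvStepX, hnil]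
      · intro q hq
        have hne : q.1 ≠ p.1 := by
          intro he
          exact hnd.1 (he ▸ List.mem_map_of_mem hq)
        rw [PySem.Dict.contains_insert]
        simp [hne, hfresh q (List.mem_cons_of_mem _ hq)]

theorem pvX_items (rows : List (Int × String)) :
    ∀ (d : PySem.Dict Int (List Int)),
      (∀ p ∈ rows, d.contains p.1 = false) → (rows.map (·.1)).Nodup →
      (rows.foldl pvStepX d).items = d.items ++ rows.filterMap pvRowItem := by
  induction rows with
  | nil => simp
  | cons p rest ih =>
    intro d hfresh hnd
    have hp : d.contains p.1 = false := hfresh p (List.mem_cons_self ..)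
    simp only [List.map_cons, List.nodup_cons] at hnd
    simp only [List.foldl_cons, List.filterMap_cons]
    by_cases hnil : pvRowWalls p.2 = []
    · simp only [pvStepX, pvRowItem, if_pos hnil]
      exact ih d (fun q hq => hfresh q (List.mem_cons_of_mem _ hq)) hnd.2
    · simp only [pvStepX, pvRowItem, if_neg hnil]
      rw [ih (d.insert p.1 (pvRowWalls p.2)) ?_ hnd.2]
      · rw [PySem.Dict.items_insert_of_not_contains _ _ hp]
        simp [pvRowItem]
      · intro q hq
        have hne : q.1 ≠ p.1 := by
          intro he
          exact hnd.1 (he ▸ List.mem_map_of_mem hq)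
        rw [PySem.Dict.contains_insert]
        simp [hne, hfresh q (List.mem_cons_of_mem _ hq)]

theorem pvWalls_eq_flat_items (rows : List (Int × String)) :
    rows.flatMap (fun p => (pvRowWalls p.2).map (fun j => (p.1, j)))
      = (rows.filterMap pvRowItem).flatMap (fun p => p.2.map (fun j => (p.1, j))) := by
  induction rows with
  | nil => simp
  | cons p rest ih =>
    by_cases hnil : pvRowWalls p.2 = [] <;>
      simp [pvRowItem, hnil, ih]

theorem pvRowsNodup (lines : List String) :
    ((PySem.List.enumerate lines 0).map (·.1)).Nodup := by
  have h := PySem.List.pairwise_lt_enumerate lines (0 : Int)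
  rw [List.nodup_iff_pairwise_ne, List.pairwise_map]
  exact h.imp (fun hlt => ne_of_lt hlt)

-- ===== player: keep-last forward scan = reverse search with early break =====

theorem pvKeepLast {α β : Type} (pred : α → Bool) (g : α → β) (l : List α) :
    ∀ (p0 : β), l.foldl (fun p q => if pred q then g q else p) p0
      = (match l.reverse.find? pred with | some q => g q | none => p0) := by
  induction l with
  | nil => simp
  | cons q t ih =>
    intro p0
    simp only [List.foldl_cons, List.reverse_cons, List.find?_append, ih]
    cases hf : t.reverse.find? pred with
    | some r => simp
    | none =>
      by_cases hq : pred q = true <;> simp [List.find?, hq]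

theorem pvFindPlayer_eq (l : List (Int × String)) :
    pvFindPlayer l
      = (match l.find? (fun p => decide (PySem.Str.rfind p.2 "^" ≠ -1)) with
         | some p => (p.1, PySem.Str.rfind p.2 "^")
         | none => ((0 : Int), (0 : Int))) := by
  induction l with
  | nil => rfl
  | cons p t ih =>
    by_cases h : PySem.Str.rfind p.2 "^" ≠ -1
    · rw [List.find?_cons_of_pos (by simpa using h)]
      simp only [pvFindPlayer]
      rw [if_pos h]
    · rw [List.find?_cons_of_neg (by simpa using h)]
      simp only [pvFindPlayer]
      rw [if_neg h]
      exact ih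

-- find? congruence on members (no library lemma found by exact?/rw?)
theorem pvFind?_congr {α : Type} (l : List α) (p q : α → Bool)
    (h : ∀ x ∈ l, p x = q x) : l.find? p = l.find? q := by
  induction l with
  | nil => rfl
  | cons a t ih =>
    have ha := h a (List.mem_cons_self ..)
    cases hp : p a with
    | true => rw [List.find?_cons_of_pos hp, List.find?_cons_of_pos (ha ▸ hp)]
    | false =>
      rw [List.find?_cons_of_neg (by simp [hp]), List.find?_cons_of_neg (by simp [← ha, hp])]
      exact ih (fun x hx => h x (List.mem_cons_of_mem _ hx))

-- rfind.go for a single-char needle, characterised by a reverse search over range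
theorem pvGo_eq (cs : List Char) :
    ∀ (k : Nat), PySem.Chars.rfind.go cs ['^'] k
      = (match (List.range (k+1)).reverse.find? (fun i => ['^'].isPrefixOf (cs.drop i)) with
         | some i => (i : Int)
         | none => -1) := by
  intro k
  induction k with
  | zero =>
    by_cases h : (['^'].isPrefixOf cs) = true <;>
      simp [PySem.Chars.rfind.go, List.range_succ, List.find?, h]
  | succ n ih =>
    rw [List.range_succ (n := n + 1)]
    simp only [List.reverse_append, List.reverse_cons, List.reverse_nil, List.nil_append,
      List.cons_append, List.find?]
    by_cases h : (['^'].isPrefixOf (cs.drop (n+1))) = true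
    · simp [PySem.Chars.rfind.go, h]
    · simp only [PySem.Chars.rfind.go, h]
      simpa [h] using ih

theorem pvPrefix_head (cs : List Char) (i : Nat) :
    (['^'].isPrefixOf (cs.drop i)) = ((cs.drop i).head? == some '^') := by
  cases h : cs.drop i with
  | nil => simp [List.isPrefixOf]
  | cons a t =>
    by_cases ha : a = '^' <;> simp [List.isPrefixOf, ha, BEq.comm]

-- rfind on a string equals a reverse find? over its enumerated characters
-- rfind on a string equals a reverse find? over its enumerated characters
theorem pvRfind_eq (line : String) :
    PySem.Str.rfind line "^"
      = (match (PySem.List.enumerate line.toList 0).reverse.find? (fun q => q.2 == '^') with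
         | some q => q.1
         | none => -1) := by
  have henum : PySem.List.enumerate line.toList 0
      = (List.range line.toList.length).map (fun k : Nat => (Int.ofNat k, line.toList.getD k ' ')) := by
    apply List.ext_getElem
    · simp [PySem.List.length_enumerate]
    · intro k h1 h2
      simp only [PySem.List.length_enumerate] at h1
      simp only [PySem.List.getElem_enumerate, List.getElem_map, List.getElem_range]
      simp [List.getD, List.getElem?_eq_getElem h1, Int.ofNat_eq_natCast]
  rw [henum, ← List.map_reverse, List.find?_map]
  show PySem.Chars.rfind line.toList ['^'] = _
  unfold PySem.Chars.rfind
  rw [pvGo_eq]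
  rw [List.range_succ, List.reverse_append]
  simp only [List.reverse_cons, List.reverse_nil, List.nil_append, List.cons_append]
  rw [List.find?_cons_of_neg (by
    rw [List.drop_eq_nil_iff.mpr (le_refl _)]
    simp [List.isPrefixOf])]
  rw [pvFind?_congr _ _ ((fun q : Int × Char => q.2 == '^') ∘
      (fun k : Nat => (Int.ofNat k, line.toList.getD k ' ')))
    (by
      intro i hi
      rw [List.mem_reverse, List.mem_range] at hi
      rw [pvPrefix_head]
      simp [List.head?_drop, List.getElem?_eq_getElem hi])]
  cases hf : (List.range line.toList.length).reverse.find?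
      ((fun q : Int × Char => q.2 == '^') ∘
        (fun k : Nat => (Int.ofNat k, line.toList.getD k ' '))) with
  | none => simp
  | some i => simp

-- on the found row, rfind is the keep-last column; nonzero rows have index ≥ 0
theorem pvRow_player (i : Int) (line : String) (p : Int × Int) :
    ((PySem.List.enumerate line.toList 0).foldl
        (fun p q => if q.2 = '^' then (i, q.1) else p) p)
      = (if PySem.Str.rfind line "^" ≠ -1 then (i, PySem.Str.rfind line "^") else p) := by
  have hfold : ((PySem.List.enumerate line.toList 0).foldl
      (fun p q => if q.2 = '^' then (i, q.1) else p) p)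
      = ((PySem.List.enumerate line.toList 0).foldl
      (fun p q => if (fun q : Int × Char => q.2 == '^') q then (i, q.1) else p) p) := by
    apply PySem.List.foldl_congr_mem
    intro acc q _
    by_cases h : q.2 = '^' <;> simp [h]
  rw [hfold, pvKeepLast (fun q : Int × Char => q.2 == '^') (fun q => (i, q.1)), pvRfind_eq]
  cases hf : (PySem.List.enumerate line.toList 0).reverse.find? (fun q => q.2 == '^') with
  | none => simp
  | some q =>
    have hq : q ∈ PySem.List.enumerate line.toList 0 := by
      have := List.mem_of_find?_eq_some hf
      simpa using this
    rw [PySem.List.mem_enumerate_iff] at hq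
    obtain ⟨k, hk, rfl⟩ := hq
    simp

theorem pvPlayer_cells (lines : List String) :
    pvPlayer (pvCells lines) (0, 0)
      = pvFindPlayer (PySem.List.enumerate lines 0).reverse := by
  unfold pvPlayer pvCells
  rw [List.foldl_flatMap]
  have hrow : ∀ (p : Int × String) (acc : Int × Int),
      ((PySem.List.enumerate p.2.toList 0).map (fun q => (p.1, q.1, q.2))).foldl
          (fun p t => if t.2.2 = '^' then (t.1, t.2.1) else p) acc
        = (if PySem.Str.rfind p.2 "^" ≠ -1 then (p.1, PySem.Str.rfind p.2 "^") else acc) := by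
    intro p acc
    rw [List.foldl_map]
    exact pvRow_player p.1 p.2 acc
  have hsteps : ((PySem.List.enumerate lines 0).foldl
      (fun acc p => ((PySem.List.enumerate p.2.toList 0).map (fun q => (p.1, q.1, q.2))).foldl
          (fun p t => if t.2.2 = '^' then (t.1, t.2.1) else p) acc) ((0 : Int), (0 : Int)))
      = ((PySem.List.enumerate lines 0).foldl
      (fun acc p => if (fun p : Int × String => decide (PySem.Str.rfind p.2 "^" ≠ -1)) p
          then (p.1, PySem.Str.rfind p.2 "^") else acc) ((0 : Int), (0 : Int))) := by
    apply PySem.List.foldl_congr_mem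
    intro acc p _
    rw [hrow p acc]
    by_cases h : PySem.Str.rfind p.2 "^" ≠ -1
    · rw [if_pos h, if_pos (by simpa using h)]
    · rw [if_neg h, if_neg (by simpa using h)]
  rw [hsteps, pvKeepLast, pvFindPlayer_eq]
  cases hf : List.find? (fun p : Int × String => decide (PySem.Str.rfind p.2 "^" ≠ -1))
      (PySem.List.enumerate lines 0).reverse with
  | none => rfl
  | some q => rfl

-- ===== VERDICT (by name: the statement is the Claim_ definition above) =====
theorem extract_walls_and_player_from_text_spec : Claim_equal_extract_walls_and_player_from_text := by
  intro lines _
  unfold Spec_extract_walls_and_player_from_text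
  rw [pvA_eq_cells]
  simp only [pvA_foldl]
  unfold extract_walls_and_player_from_text_alt
  have hfresh : ∀ p ∈ PySem.List.enumerate lines 0,
      (PySem.Dict.empty : PySem.Dict Int (List Int)).contains p.1 = false := by
    intro p _; simp
  have hnd := pvRowsNodup lines
  have hx : ((pvWalls (pvCells lines)).foldl pvSX PySem.Dict.empty)
      = (PySem.List.enumerate lines 0).foldl pvStepX PySem.Dict.empty := by
    rw [pvWalls_cells, pvX_both _ _ hfresh hnd]
  have hxb : ((PySem.List.enumerate lines 0).foldl (fun d p =>
      let js := pvRowWalls p.2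
      if js = [] then d else d.insert p.1 js) PySem.Dict.empty)
      = (PySem.List.enumerate lines 0).foldl pvStepX PySem.Dict.empty := rfl
  have hy : ((pvWalls (pvCells lines)).foldl pvSY PySem.Dict.empty)
      = (((PySem.List.enumerate lines 0).foldl pvStepX PySem.Dict.empty).items.foldl
          (fun d p => p.2.foldl (fun d j => d.insert j (d.getD j [] ++ [p.1])) d)
          PySem.Dict.empty) := by
    rw [pvX_items _ _ hfresh hnd]
    rw [pvWalls_cells, pvWalls_eq_flat_items, List.foldl_flatMap]
    have : ((PySem.Dict.empty : PySem.Dict Int (List Int)).items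
        ++ (PySem.List.enumerate lines 0).filterMap pvRowItem)
        = (PySem.List.enumerate lines 0).filterMap pvRowItem := by
      simp [PySem.Dict.empty]
    rw [this]
    apply PySem.List.foldl_congr_mem
    intro d p _
    rw [List.foldl_map]
    rfl
  rw [hx, hxb, hy, pvPlayer_cells]
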